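-- pv_equiv track=rewrite | github.com/arhikit/algorithms_data_structure | 2.4.max_support_stack.py | process_requests
-- ===== SOURCE A (Python) =====
-- def process_requests(n, requests):
--
--     # put only the maximums on the stack,
--     # since the values themselves are not needed
--     stack = [0]
--
--     # output: results of "max" requests
--     output = []
--
--     for req in requests:
--
--         if req == "max":
--             output.append(stack[-1])
--
--         if req == "pop":
--             stack.pop()
--
--         if "push" in req:
--             stack.append(max(stack[-1], int(req.split()[1])))
--
--     return output
-- ===== SOURCE B (Python) =====
-- def process_requests(n, requests):
--     # classic two-stack max-stack: vals holds the pushed values themselves,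
--     # maxes holds only the record maxima; maxes[-1] is the current maximum
--     vals = [0]
--     maxes = [0]
--     output = []
--     for req in requests:
--         if req == "max":
--             output.append(maxes[-1])
--         elif req == "pop":
--             v = vals.pop()
--             if v == maxes[-1]:
--                 maxes.pop()
--         elif "push" in req:
--             v = int(req.split()[1])
--             if maxes[-1] <= v:
--                 maxes.append(v)
--             vals.append(v)
--     return output
-- ===== Notes on version B (the rewrite author's own statement) =====
-- stated objective: alternative
-- what changed: A keeps a single stack of running maxima (pushing max(top, value)); B uses the classic two-stack max-stack: a plain stack of pushed values plus an auxiliary stack of record maxima, popped only when the popped value equals its top.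
import Mathlib
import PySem

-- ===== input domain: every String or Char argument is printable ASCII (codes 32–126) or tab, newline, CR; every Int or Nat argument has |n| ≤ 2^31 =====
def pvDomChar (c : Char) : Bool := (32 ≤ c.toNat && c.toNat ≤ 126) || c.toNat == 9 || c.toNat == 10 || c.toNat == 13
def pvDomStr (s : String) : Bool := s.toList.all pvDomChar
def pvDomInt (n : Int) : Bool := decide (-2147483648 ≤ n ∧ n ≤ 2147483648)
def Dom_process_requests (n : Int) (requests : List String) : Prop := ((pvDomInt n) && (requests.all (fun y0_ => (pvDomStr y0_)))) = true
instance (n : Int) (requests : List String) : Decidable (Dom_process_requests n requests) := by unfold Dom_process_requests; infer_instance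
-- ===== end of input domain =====

-- B replaces A's stack of running maxima by the classic two-stack max-stack (a plain value
-- stack plus a stack of record maxima, popped only when the popped value equals the record);
-- an alternative algorithm of the same cost. Both ports keep stacks top-first (head = [-1]).

-- ===== PORT A =====
-- value pushed by a "push v" request: int(req.split()[1]); getD defaults only fire outside Pre_
def pvPushVal (req : String) : Int :=
  (PySem.Int.ofStr? ((PySem.Str.split₀ req).getD 1 "")).getD 0

def pvStepA (st : List Int × List Int) (req : String) : List Int × List Int :=
  let output := if req = "max" then st.2 ++ [st.1.headD 0] else st.2
  let stack := if req = "pop" then st.1.tail else st.1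
  let stack := if PySem.Str.isIn "push" req then
      (max (stack.headD 0) (pvPushVal req)) :: stack
    else stack
  (stack, output)

def process_requests (n : Int) (requests : List String) : List Int :=
  (requests.foldl pvStepA ([0], [])).2

-- ===== PORT B =====
-- explicit recursion over the requests carrying B's two stacks (vals, maxes) and the output
def pvRunB : List String → List Int → List Int → List Int → List Int
  | [], _vals, _maxes, out => out
  | req :: rest, vals, maxes, out =>
    if req = "max" then
      pvRunB rest vals maxes (out ++ [maxes.headD 0])
    else if req = "pop" then
      let v := vals.headD 0
      pvRunB rest vals.tail (if v = maxes.headD 0 then maxes.tail else maxes) out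
    else if PySem.Str.isIn "push" req then
      let v := (PySem.Int.ofStr? ((PySem.Str.split₀ req).getD 1 "")).getD 0
      pvRunB rest (v :: vals) (if maxes.headD 0 ≤ v then v :: maxes else maxes) out
    else
      pvRunB rest vals maxes out

def process_requests_alt (n : Int) (requests : List String) : List Int :=
  pvRunB requests [0] [0] []

-- ===== PRECONDITION & SPEC =====
-- Pre_ excludes exactly the inputs where Python A raises: a "max"/"pop"/push request reached
-- with the stack already empty (IndexError), a push request whose split has no second token
-- (IndexError), or whose second token is not a valid int literal (ValueError).
-- pvOk k rs: with k items currently on the stack, the requests rs never access an empty stack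
-- and every push parses; it tracks only the stack SIZE (a balance counter), not the values.
def pvOk : Nat → List String → Bool
  | _, [] => true
  | k, req :: rs =>
    if req = "max" then decide (1 ≤ k) && pvOk k rs
    else if req = "pop" then decide (1 ≤ k) && pvOk (k - 1) rs
    else if PySem.Str.isIn "push" req then
      decide (1 ≤ k) && decide (2 ≤ (PySem.Str.split₀ req).length)
        && (PySem.Int.ofStr? ((PySem.Str.split₀ req).getD 1 "")).isSome && pvOk (k + 1) rs
    else pvOk k rs

def Pre_process_requests (n : Int) (requests : List String) : Prop := pvOk 1 requests = true
instance (n : Int) (requests : List String) : Decidable (Pre_process_requests n requests) := by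
  unfold Pre_process_requests; infer_instance

def pvWitness_process_requests : Int × List String := (3, ["push 2", "max", "pop", "max"])

def Spec_process_requests (n : Int) (requests : List String) (out : List Int) : Prop := out = process_requests_alt n requests
instance (n : Int) (requests : List String) (out : List Int) : Decidable (Spec_process_requests n requests out) := by unfold Spec_process_requests; infer_instance

-- ===== CLAIM (what is proved, stated in full; the proofs are below) =====
def Claim_equal_process_requests : Prop := ∀ (n : Int) (requests : List String), Dom_process_requests n requests → Pre_process_requests n requests → Spec_process_requests n requests (process_requests n requests)

-- ===== LEMMAS AND PROOFS =====

-- ghost transforms of B's value stack: A's stack is the suffix maxima of vals,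
-- B's maxes stack is the sublist of record values of vals
def pvSuff : List Int → List Int
  | [] => []
  | x :: xs => max x ((pvSuff xs).headD x) :: pvSuff xs

def pvRec : List Int → List Int
  | [] => []
  | x :: xs => if (pvSuff xs).headD x ≤ x then x :: pvRec xs else pvRec xs

theorem pv_foldl_max_max (ys : List Int) (x y : Int) :
    ys.foldl max (max x y) = max x (ys.foldl max y) := by
  induction ys generalizing y with
  | nil => simp
  | cons z zs ih => simp [List.foldl, max_assoc, ih]

theorem pvSuff_headD (xs : List Int) (x d : Int) :
    (pvSuff (x :: xs)).headD d = xs.foldl max x := by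
  induction xs generalizing x d with
  | nil => simp [pvSuff]
  | cons y ys ih =>
    show max x ((pvSuff (y :: ys)).headD x) = (y :: ys).foldl max x
    rw [ih y x]
    simp [List.foldl, ← pv_foldl_max_max]

-- headD of pvSuff over a nonempty list ignores the default
theorem pvSuff_headD_default (xs : List Int) (x a b : Int) :
    (pvSuff (x :: xs)).headD a = (pvSuff (x :: xs)).headD b := by
  rw [pvSuff_headD, pvSuff_headD]

-- the top of B's maxes stack equals the top of A's running-max stack
theorem pvRec_headD (xs : List Int) (x : Int) :
    (pvRec (x :: xs)).headD 0 = (pvSuff (x :: xs)).headD 0 := by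
  induction xs generalizing x with
  | nil => simp [pvRec, pvSuff]
  | cons y ys ih =>
    show (if (pvSuff (y :: ys)).headD x ≤ x then x :: pvRec (y :: ys)
          else pvRec (y :: ys)).headD 0
        = (max x ((pvSuff (y :: ys)).headD x) :: pvSuff (y :: ys)).headD 0
    by_cases h : (pvSuff (y :: ys)).headD x ≤ x
    · have h' : (pvSuff (y :: ys)).head?.getD x ≤ x := by simpa using h
      simp [h', max_eq_left h']
    · rw [if_neg h, List.headD_cons, ih y, pvSuff_headD_default ys y 0 x]
      exact (max_eq_right (le_of_lt (not_le.mp h))).symm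

theorem pv_loop (rs : List String) : ∀ (v out : List Int),
    pvOk v.length rs = true →
    (rs.foldl pvStepA (pvSuff v, out)).2 = pvRunB rs v (pvRec v) out := by
  induction rs with
  | nil => intro v out _; rfl
  | cons req rest ih =>
    intro v out hok
    unfold pvOk at hok
    by_cases hmax : req = "max"
    · simp only [hmax, if_pos rfl] at hok
      obtain ⟨hk, hrest⟩ := Bool.and_eq_true_iff.mp hok
      obtain ⟨x, xs, rfl⟩ : ∃ x xs, v = x :: xs := by
        cases v with
        | nil => simp at hk
        | cons x xs => exact ⟨x, xs, rfl⟩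
      have hni : PySem.Str.isIn "push" "max" = false := by decide
      have hnp : ¬ ("max" : String) = "pop" := by decide
      simp only [List.foldl_cons, pvStepA, pvRunB, hmax, if_pos rfl, hni, if_neg hnp,
        Bool.false_eq_true, if_false]
      rw [pvRec_headD]
      exact ih (x :: xs) _ hrest
    · by_cases hpop : req = "pop"
      · simp only [hmax, if_neg hmax, hpop, if_pos rfl] at hok
        obtain ⟨hk, hrest⟩ := Bool.and_eq_true_iff.mp hok
        obtain ⟨x, xs, rfl⟩ : ∃ x xs, v = x :: xs := by
          cases v with
          | nil => simp at hk
          | cons x xs => exact ⟨x, xs, rfl⟩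
        have hni : PySem.Str.isIn "push" "pop" = false := by decide
        simp only [List.foldl_cons, pvStepA, pvRunB, hpop, if_neg hmax, if_pos rfl, hni,
          Bool.false_eq_true, if_false]
        have hmaxes : (if (x :: xs).headD 0 = (pvRec (x :: xs)).headD 0
            then (pvRec (x :: xs)).tail else pvRec (x :: xs)) = pvRec xs := by
          show (if x = (pvRec (x :: xs)).headD 0 then (pvRec (x :: xs)).tail else pvRec (x :: xs)) = pvRec xs
          by_cases hc : (pvSuff xs).headD x ≤ x
          · have h1 : pvRec (x :: xs) = x :: pvRec xs := by
              simp only [pvRec]; rw [if_pos hc]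
            rw [h1, if_pos (show x = (x :: pvRec xs).headD 0 from rfl)]
            rfl
          · have hr : pvRec (x :: xs) = pvRec xs := by
              simp only [pvRec]; rw [if_neg hc]
            have hc' := lt_of_not_ge hc
            obtain ⟨y, ys, rfl⟩ : ∃ y ys, xs = y :: ys := by
              cases xs with
              | nil => simp [pvSuff] at hc'
              | cons y ys => exact ⟨y, ys, rfl⟩
            have hne : ¬ x = (pvRec (y :: ys)).headD 0 := by
              rw [pvRec_headD, pvSuff_headD_default ys y 0 x]
              exact ne_of_lt hc'
            rw [hr, if_neg hne]
        rw [hmaxes]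
        have htail : (pvSuff (x :: xs)).tail = pvSuff xs := rfl
        rw [htail]
        exact ih xs out (by simpa using hrest)
      · by_cases hpush : PySem.Str.isIn "push" req = true
        · simp only [if_neg hmax, if_neg hpop, hpush, if_pos rfl] at hok
          have hok' : ((1 ≤ v.length ∧ 2 ≤ (PySem.Str.split₀ req).length) ∧
                (PySem.Int.ofStr? ((PySem.Str.split₀ req)[1]?.getD "")).isSome = true) ∧
              pvOk (v.length + 1) rest = true := by
            simpa [Bool.and_eq_true_iff] using hok
          obtain ⟨⟨⟨hk, _⟩, _⟩, hrest⟩ := hok'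
          obtain ⟨x, xs, rfl⟩ : ∃ x xs, v = x :: xs := by
            cases v with
            | nil => simp at hk
            | cons x xs => exact ⟨x, xs, rfl⟩
          simp only [List.foldl_cons, pvStepA, pvRunB, if_neg hmax, if_neg hpop, hpush, if_pos rfl]
          have hsuff : pvSuff (pvPushVal req :: x :: xs)
              = max ((pvSuff (x :: xs)).headD 0) (pvPushVal req) :: pvSuff (x :: xs) := by
            show max (pvPushVal req) ((pvSuff (x :: xs)).headD (pvPushVal req)) :: pvSuff (x :: xs) = _
            rw [pvSuff_headD, pvSuff_headD, max_comm]
          have hrec : pvRec (pvPushVal req :: x :: xs)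
              = (if (pvRec (x :: xs)).headD 0 ≤ pvPushVal req
                 then pvPushVal req :: pvRec (x :: xs) else pvRec (x :: xs)) := by
            show (if (pvSuff (x :: xs)).headD (pvPushVal req) ≤ pvPushVal req then _ else _) = _
            rw [pvRec_headD, pvSuff_headD_default xs x (pvPushVal req) 0]
          have := ih (pvPushVal req :: x :: xs) out (by simpa using hrest)
          rw [hsuff, hrec] at this
          exact this
        · simp only [if_neg hmax, if_neg hpop, hpush] at hok
          simp only [List.foldl_cons, pvStepA, pvRunB, if_neg hmax, if_neg hpop,
            hpush, if_false]
          exact ih v out (by simpa using hok)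

-- ===== VERDICT (by name: the statement is the Claim_ definition above) =====
theorem process_requests_spec : Claim_equal_process_requests := by
  intro n requests _ hpre
  show process_requests n requests = process_requests_alt n requests
  unfold process_requests process_requests_alt
  have h := pv_loop requests [0] [] (by simpa using hpre)
  simpa [pvSuff, pvRec] using h
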